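-- pv_equiv track=rewrite | github.com/snsinfu/web-wordgen | data/ngram_markov_matrix.py | generate_ngram_pairs
-- ===== SOURCE A (Python) =====
-- PREFIX = '('
--
-- SUFFIX = ')'
--
-- def generate_ngram_pairs(words, n, backward):
--     for word in words:
--         word = PREFIX + word + SUFFIX
--         ngrams = generate_ngrams(word, n)
--
--         for pred, succ in generate_pairs(ngrams):
--             if backward:
--                 yield succ, pred[0]
--             else:
--                 yield pred, succ[-1]
--
-- def generate_ngrams(word, n):
--     for i in range(len(word) - n + 1):
--         yield word[i:(i + n)]
--
-- def generate_pairs(seq):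
--     it = iter(seq)
--
--     for prev in it:
--         break
--
--     for curr in it:
--         yield prev, curr
--         prev = curr
-- ===== SOURCE B (Python) =====
-- PREFIX = '('
--
-- SUFFIX = ')'
--
-- def generate_ngram_pairs(words, n, backward):
--     for word in words:
--         s = PREFIX + word + SUFFIX
--         window = s[:n]
--         for c in s[n:]:
--             if backward:
--                 yield window[1:] + c, window[0]
--             else:
--                 yield window, c
--             window = window[1:] + c
-- ===== Notes on version B (the rewrite author's own statement) =====
-- stated objective: alternative
-- what changed: Replaced A's generator pipeline (slice out every n-gram of the word, then pair consecutive ones via an iterator) by a single character pass per word that maintains a rolling window accumulator (window = window[1:] + c) and emits each pair from the window and the incoming character, never re-slicing the word.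
import Mathlib
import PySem

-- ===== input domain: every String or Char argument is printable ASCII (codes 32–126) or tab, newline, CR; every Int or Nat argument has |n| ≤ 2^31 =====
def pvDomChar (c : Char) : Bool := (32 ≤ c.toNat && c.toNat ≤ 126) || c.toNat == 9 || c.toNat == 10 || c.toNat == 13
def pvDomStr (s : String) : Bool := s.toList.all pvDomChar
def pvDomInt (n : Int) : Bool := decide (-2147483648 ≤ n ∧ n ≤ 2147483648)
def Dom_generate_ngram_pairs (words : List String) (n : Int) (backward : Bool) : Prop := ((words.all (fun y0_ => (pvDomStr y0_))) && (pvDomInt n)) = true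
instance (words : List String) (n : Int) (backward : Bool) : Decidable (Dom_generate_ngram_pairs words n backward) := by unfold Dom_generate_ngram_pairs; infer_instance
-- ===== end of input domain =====

-- B replaces A's generator pipeline (slice out every n-gram, pair consecutive ones through an
-- iterator) by one character pass per word with a rolling window accumulator (window = window[1:] + c),
-- never re-slicing the word: a different single-pass decomposition, same cost; return values only
-- (generators are ported as lists).

-- ===== PORT A =====

-- s[i] as a one-character Python string (none = IndexError, excluded by Pre_)
def pvCharStr (o : Option Char) : String := (o.map (fun c => String.ofList [c])).getD ""

-- generate_ngrams(word, n): [word[i:i+n] for i in range(len(word)-n+1)]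
def pvNgrams (cs : List Char) (n : Int) : List String :=
  (PySem.List.pyRange 0 ((cs.length : Int) - n + 1) 1).map
    (fun i => String.ofList (PySem.List.slice cs (some i) (some (i + n))))

-- generate_pairs(seq): prev = first element, then yield (prev, curr) sliding
def pvPairs (seq : List String) : List (String × String) :=
  match seq with
  | [] => []
  | prev :: rest =>
    (rest.foldl (fun (st : String × List (String × String)) curr =>
      (curr, st.2 ++ [(st.1, curr)])) (prev, [])).2

def generate_ngram_pairs (words : List String) (n : Int) (backward : Bool) : List (String × String) :=
  words.foldl (fun acc word =>
    let cs := ('(' :: word.toList) ++ [')']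
    let ngrams := pvNgrams cs n
    acc ++ (pvPairs ngrams).map (fun pc =>
      if backward then (pc.2, pvCharStr (PySem.List.pyGet? pc.1.toList 0))
      else (pc.1, pvCharStr (PySem.List.pyGet? pc.2.toList (-1))))) []

-- ===== PORT B =====

-- the body of B's inner 'for c in s[n:]' loop: yield from the window and the incoming
-- character, then shift the window (window = window[1:] + c)
def pvStep (backward : Bool) (st : List Char × List (String × String)) (c : Char) :
    List Char × List (String × String) :=
  let w := st.1
  let pair := if backward
    then (String.ofList (PySem.List.slice w (some 1) none ++ [c]), pvCharStr (PySem.List.pyGet? w 0))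
    else (String.ofList w, String.ofList [c])
  (PySem.List.slice w (some 1) none ++ [c], st.2 ++ [pair])

def generate_ngram_pairs_alt (words : List String) (n : Int) (backward : Bool) : List (String × String) :=
  words.foldl (fun acc word =>
    let s := ('(' :: word.toList) ++ [')']
    acc ++ ((PySem.List.slice s (some n) none).foldl (pvStep backward)
      (PySem.List.slice s none (some n), [])).2) []

-- ===== PRECONDITION & SPEC =====
-- Pre_ excludes n ≤ 0 with a nonempty word list: there every window word[i:i+n] is the empty
-- string and A raises IndexError on pred[0] / succ[-1].
def Pre_generate_ngram_pairs (words : List String) (n : Int) (backward : Bool) : Prop :=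
  1 ≤ n ∨ words = []
instance (words : List String) (n : Int) (backward : Bool) : Decidable (Pre_generate_ngram_pairs words n backward) := by unfold Pre_generate_ngram_pairs; infer_instance

def pvWitness_generate_ngram_pairs : List String × Int × Bool := (["ab"], 2, false)

def Spec_generate_ngram_pairs (words : List String) (n : Int) (backward : Bool) (out : List (String × String)) : Prop := out = generate_ngram_pairs_alt words n backward
instance (words : List String) (n : Int) (backward : Bool) (out : List (String × String)) : Decidable (Spec_generate_ngram_pairs words n backward out) := by unfold Spec_generate_ngram_pairs; infer_instance

-- ===== CLAIM (what is proved, stated in full; the proofs are below) =====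
def Claim_equal_generate_ngram_pairs : Prop := ∀ (words : List String) (n : Int) (backward : Bool), Dom_generate_ngram_pairs words n backward → Pre_generate_ngram_pairs words n backward → Spec_generate_ngram_pairs words n backward (generate_ngram_pairs words n backward)

-- ===== LEMMAS AND PROOFS =====

-- the pair A emits for window start i (pred = s[i:i+n], succ = s[i+1:i+1+n])
def pvIdxPair (s : List Char) (n : Int) (backward : Bool) (i : Int) : String × String :=
  let pred := PySem.List.slice s (some i) (some (i + n))
  let succ := PySem.List.slice s (some (i + 1)) (some (i + 1 + n))
  if backward then (String.ofList succ, pvCharStr (PySem.List.pyGet? pred 0))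
  else (String.ofList pred, pvCharStr (PySem.List.pyGet? succ (-1)))

-- the sequence of pairs B's rolling window emits from window w and remaining characters l
def pvRoll (backward : Bool) : List Char → List Char → List (String × String)
  | _, [] => []
  | w, c :: cs =>
    (if backward then (String.ofList (w.tail ++ [c]), pvCharStr (PySem.List.pyGet? w 0))
     else (String.ofList w, String.ofList [c])) :: pvRoll backward (w.tail ++ [c]) cs

-- generate_pairs is zip with the tail
theorem pvPairs_aux (rest : List String) (prev : String) (acc : List (String × String)) :
    (rest.foldl (fun (st : String × List (String × String)) curr =>
      (curr, st.2 ++ [(st.1, curr)])) (prev, acc)).2 = acc ++ (prev :: rest).zip rest := by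
  induction rest generalizing prev acc with
  | nil => simp
  | cons c cs ih => simp [List.foldl_cons, ih]

theorem pvPairs_eq_zip (seq : List String) : pvPairs seq = seq.zip seq.tail := by
  cases seq with
  | nil => rfl
  | cons p rest => simpa [pvPairs] using pvPairs_aux rest p []

-- zip of a mapped range with its own tail = map of adjacent index pairs (Nat form)
theorem zip_tail_map_range {α : Type} (g : Nat → α) (m : Nat) :
    ((List.range m).map g).zip (((List.range m).map g).tail)
      = (List.range (m - 1)).map (fun j => (g j, g (j + 1))) := by
  apply List.ext_getElem
  · simp [List.length_zip]
  · intro i h1 h2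
    simp only [List.getElem_zip, ← List.drop_one, List.getElem_drop, List.getElem_map,
      List.getElem_range]
    simp [Nat.add_comm]

-- Int-range form
theorem zip_tail_map_pyRange {α : Type} (f : Int → α) (k : Int) :
    (((PySem.List.pyRange 0 k 1).map f).zip (((PySem.List.pyRange 0 k 1).map f).tail))
      = (PySem.List.pyRange 0 (k - 1) 1).map (fun i => (f i, f (i + 1))) := by
  rw [PySem.List.pyRange_one 0 k, PySem.List.pyRange_one 0 (k - 1)]
  simp only [List.map_map]
  have h := zip_tail_map_range (fun j : Nat => f ((0 : Int) + j)) (k - 0).toNat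
  have hk : ((k : Int) - 1 - 0).toNat = (k - 0).toNat - 1 := by omega
  rw [hk]
  refine h.trans ?_
  apply List.map_congr_left
  intro j hj
  simp [Function.comp]

-- A's inner loop = the map of pvIdxPair over the window starts
theorem inner_A_eq (cs : List Char) (n : Int) (backward : Bool) :
    (pvPairs (pvNgrams cs n)).map (fun pc =>
      if backward then (pc.2, pvCharStr (PySem.List.pyGet? pc.1.toList 0))
      else (pc.1, pvCharStr (PySem.List.pyGet? pc.2.toList (-1))))
    = (PySem.List.pyRange 0 ((cs.length : Int) - n) 1).map (pvIdxPair cs n backward) := by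
  unfold pvNgrams
  rw [pvPairs_eq_zip, zip_tail_map_pyRange
    (fun i => String.ofList (PySem.List.slice cs (some i) (some (i + n))))
    ((cs.length : Int) - n + 1)]
  have hk : (cs.length : Int) - n + 1 - 1 = (cs.length : Int) - n := by ring
  rw [hk, List.map_map]
  apply List.map_congr_left
  intro i _
  cases backward <;>
    simp [Function.comp, pvIdxPair, pvCharStr, String.toList_ofList]

-- B's fold accumulates pvRoll
theorem foldB_eq_roll (backward : Bool) (l : List Char) :
    ∀ (w : List Char) (acc : List (String × String)),
    (l.foldl (pvStep backward) (w, acc)).2 = acc ++ pvRoll backward w l := by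
  induction l with
  | nil => intro w acc; simp [pvRoll]
  | cons c cs ih =>
    intro w acc
    simp only [List.foldl_cons]
    rw [show pvStep backward (w, acc) c
        = (w.tail ++ [c], acc ++ [if backward
            then (String.ofList (w.tail ++ [c]), pvCharStr (PySem.List.pyGet? w 0))
            else (String.ofList w, String.ofList [c])]) by
      simp [pvStep, PySem.List.slice_from_one]]
    rw [ih, pvRoll]
    simp

-- shifting the window: tail of s[i:i+m] plus s[i+m] is s[i+1:i+1+m]
theorem window_shift (s : List Char) (m i : Nat) (hm : 1 ≤ m) (hlt : i + m < s.length) :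
    ((s.drop i).take m).tail ++ [s[i+m]] = (s.drop (i+1)).take m := by
  have h1 : ((s.drop i).take m).tail = (s.drop (i+1)).take (m-1) := by
    rw [← List.drop_one, List.drop_take, List.drop_drop]
  have h2 : (s.drop (i+1))[m-1]? = some s[i+m] := by
    rw [List.getElem?_drop]
    have he : i + 1 + (m-1) = i + m := by omega
    rw [he, List.getElem?_eq_getElem hlt]
  have hm' : (s.drop (i+1)).take m = (s.drop (i+1)).take ((m-1)+1) := by congr 1; omega
  rw [h1, hm', List.take_add_one, h2]
  rfl

-- the pair emitted from window s[i:i+m] and character s[i+m] is A's pvIdxPair at i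
theorem head_eq (s : List Char) (m i : Nat) (backward : Bool) (hm : 1 ≤ m)
    (hlt : i + m < s.length) :
    (if backward then (String.ofList (((s.drop i).take m).tail ++ [s[i+m]]),
        pvCharStr (PySem.List.pyGet? ((s.drop i).take m) 0))
     else (String.ofList ((s.drop i).take m), String.ofList [s[i+m]]))
    = pvIdxPair s (m : Int) backward (i : Int) := by
  have hpred : PySem.List.slice s (some (i : Int)) (some ((i : Int) + (m : Int)))
      = (s.drop i).take m := PySem.List.slice_natCast_add s i m
  have hsucc : PySem.List.slice s (some ((i : Int) + 1)) (some ((i : Int) + 1 + (m : Int)))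
      = (s.drop (i+1)).take m := by
    have : ((i : Int) + 1) = ((i + 1 : Nat) : Int) := by push_cast; ring
    rw [this]; exact PySem.List.slice_natCast_add s (i+1) m
  unfold pvIdxPair
  rw [hpred, hsucc, ← window_shift s m i hm hlt]
  cases backward
  · simp only [if_false, Bool.false_eq_true]
    rw [PySem.List.pyGet?_neg_one_append_singleton]
    simp [pvCharStr]
  · simp

-- rolling from window s[i:i+m] over the rest of s produces pvIdxPair at i, i+1, …
theorem roll_eq_map (s : List Char) (m : Nat) (backward : Bool) (hm : 1 ≤ m) :
    ∀ (k i : Nat), i + m + k = s.length →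
    pvRoll backward ((s.drop i).take m) (s.drop (i+m))
      = (List.range k).map (fun j => pvIdxPair s (m : Int) backward ((i + j : Nat) : Int)) := by
  intro k
  induction k with
  | zero =>
    intro i h
    have hd : s.drop (i+m) = [] := List.drop_eq_nil_of_le (by omega)
    rw [hd]
    simp [pvRoll]
  | succ k ih =>
    intro i h
    have hlt : i + m < s.length := by omega
    rw [List.drop_eq_getElem_cons hlt, pvRoll]
    have htail : s.drop (i + m + 1) = s.drop ((i+1) + m) := by congr 1; omega
    rw [window_shift s m i hm hlt, htail, ih (i+1) (by omega)]
    rw [List.range_succ_eq_map, List.map_cons, List.map_map]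
    congr 1
    · have := head_eq s m i backward hm hlt
      rw [window_shift s m i hm hlt] at this
      simpa using this
    · apply List.map_congr_left
      intro j _
      have hj : i + 1 + j = i + (j + 1) := by omega
      simp [Function.comp, hj]

-- per-word: A's index map = B's rolling fold
theorem inner_eq (s : List Char) (m : Nat) (backward : Bool) (hm : 1 ≤ m) :
    (PySem.List.pyRange 0 ((s.length : Int) - (m : Int)) 1).map (pvIdxPair s (m : Int) backward)
      = ((PySem.List.slice s (some (m : Int)) none).foldl (pvStep backward)
          (PySem.List.slice s none (some (m : Int)), [])).2 := by
  rw [PySem.List.slice_from_natCast, PySem.List.slice_to_natCast,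
    foldB_eq_roll, List.nil_append]
  by_cases hle : m ≤ s.length
  · have h0 : (s.drop 0).take m = s.take m := by simp
    have := roll_eq_map s m backward hm (s.length - m) 0 (by omega)
    rw [h0] at this
    simp only [Nat.zero_add] at this
    rw [this, PySem.List.pyRange_one, List.map_map]
    have hk : (((s.length : Int) - (m : Int)) - 0).toNat = s.length - m := by omega
    rw [hk]
    apply List.map_congr_left
    intro j _
    simp [Function.comp]
  · have hdrop : s.drop m = [] := List.drop_eq_nil_of_le (by omega)
    have hrange : PySem.List.pyRange 0 ((s.length : Int) - (m : Int)) 1 = [] := by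
      rw [PySem.List.pyRange_one]
      have : (((s.length : Int) - (m : Int)) - 0).toNat = 0 := by omega
      rw [this]; rfl
    rw [hdrop, hrange]
    simp [pvRoll]

-- ===== VERDICT (by name: the statement is the Claim_ definition above) =====
theorem generate_ngram_pairs_spec : Claim_equal_generate_ngram_pairs := by
  intro words n backward _ hpre
  unfold Spec_generate_ngram_pairs
  rcases hpre with hn | hnil
  · obtain ⟨m, hm⟩ : ∃ m : Nat, n = (m : Int) := ⟨n.toNat, by omega⟩
    subst hm
    have hm1 : 1 ≤ m := by exact_mod_cast hn
    unfold generate_ngram_pairs generate_ngram_pairs_alt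
    rw [PySem.List.foldl_append_eq_flatMap, PySem.List.foldl_append_eq_flatMap]
    apply List.flatMap_congr
    intro word _
    rw [inner_A_eq, inner_eq _ m backward hm1]
  · subst hnil
    rfl
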